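-- pv_equiv track=rewrite | github.com/ciencia-de-los-datos/lab-01-python-basico-anfrestrepora | Testeos.py | generar_lista_tuplas
-- ===== SOURCE A (Python) =====
-- def generar_lista_tuplas(datos):
--     # Creamos un diccionario para almacenar las letras asociadas a cada valor de la segunda columna
--     asociaciones = {}
--
--     # Iteramos sobre los datos para construir el diccionario de asociaciones
--     for fila in datos:
--         letra = fila[0]   # Letra de la primera columna
--         valor = fila[1]   # Valor de la segunda columna
--
--         # Si el valor no está en el diccionario, lo inicializamos con un conjunto vacío
--         if valor not in asociaciones:
--             asociaciones[valor] = set()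
--
--         # Agregamos la letra al conjunto asociado al valor
--         asociaciones[valor].add(letra)
--
--     # Ordenamos las letras asociadas a cada valor y las convertimos en una lista
--     for valor in asociaciones:
--         asociaciones[valor] = sorted(list(asociaciones[valor]))
--
--     # Convertimos el diccionario a una lista de tuplas y ordenamos por el valor de la segunda columna
--     lista_tuplas = sorted([(valor, asociaciones[valor]) for valor in sorted(asociaciones.keys())])
--
--     return lista_tuplas
-- ===== SOURCE B (Python) =====
-- def generar_lista_tuplas(datos):
--     # For each distinct value of the second column (in sorted order), collect
--     # the sorted distinct letters of the rows carrying that value.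
--     valores = sorted({fila[1] for fila in datos})
--     return [(v, sorted({fila[0] for fila in datos if fila[1] == v})) for v in valores]
-- ===== Notes on version B (the rewrite author's own statement) =====
-- stated objective: simpler
-- what changed: Replaces A's dict-of-sets accumulation, in-place per-key sorting and final sort of the tuple list by two plain comprehensions: the sorted set of values, and for each value the sorted set of letters filtered from the rows.
import Mathlib
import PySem

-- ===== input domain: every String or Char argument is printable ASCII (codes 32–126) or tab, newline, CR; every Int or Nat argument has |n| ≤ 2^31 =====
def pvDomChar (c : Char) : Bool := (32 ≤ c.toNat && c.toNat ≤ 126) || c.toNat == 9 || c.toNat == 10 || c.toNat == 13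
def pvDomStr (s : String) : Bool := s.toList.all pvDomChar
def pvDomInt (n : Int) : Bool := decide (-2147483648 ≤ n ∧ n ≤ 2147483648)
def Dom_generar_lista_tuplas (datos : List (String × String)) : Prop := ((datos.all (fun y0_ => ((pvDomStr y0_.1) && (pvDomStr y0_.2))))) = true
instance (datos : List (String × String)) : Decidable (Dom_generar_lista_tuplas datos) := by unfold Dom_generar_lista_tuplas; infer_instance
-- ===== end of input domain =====

-- B replaces A's dict-of-sets accumulation by two plain set comprehensions over the rows (simpler; no speed claim).


-- ===== PORT A =====
-- 'if valor not in asociaciones: asociaciones[valor] = set()' followed by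
-- 'asociaciones[valor].add(letra)' is exactly Dict.modify with default Set.empty.
def generar_lista_tuplas (datos : List (String × String)) : List (String × List String) :=
  let asociaciones :=
    datos.foldl (fun d fila => d.modify fila.2 PySem.Set.empty (fun s => PySem.Set.add s fila.1))
      (PySem.Dict.empty : PySem.Dict String (List String))
  -- for valor in asociaciones: asociaciones[valor] = sorted(list(asociaciones[valor]))
  let asociaciones2 :=
    asociaciones.keys.foldl
      (fun d valor => d.insert valor (PySem.List.sorted (d.getD valor []) (fun x => x)))
      asociaciones
  -- sorted([(valor, asociaciones[valor]) for valor in sorted(asociaciones.keys())])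
  -- (Python compares the tuples themselves: first component, then second)
  PySem.List.sorted2
    ((PySem.List.sorted asociaciones2.keys (fun v => v)).map
      (fun valor => (valor, asociaciones2.getD valor [])))
    Prod.fst Prod.snd

-- ===== PORT B =====
-- valores = sorted({fila[1] for fila in datos});
-- [(v, sorted({fila[0] for fila in datos if fila[1] == v})) for v in valores]
def generar_lista_tuplas_alt (datos : List (String × String)) : List (String × List String) :=
  let valores := PySem.List.sorted (PySem.Set.ofList (datos.map Prod.snd)) (fun v => v)
  valores.map
    (fun v => (v, PySem.List.sorted
      (PySem.Set.ofList ((datos.filter (fun fila => fila.2 == v)).map Prod.fst)) (fun l => l)))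

-- ===== PRECONDITION & SPEC =====
def Spec_generar_lista_tuplas (datos : List (String × String)) (out : List (String × List String)) : Prop := out = generar_lista_tuplas_alt datos
instance (datos : List (String × String)) (out : List (String × List String)) : Decidable (Spec_generar_lista_tuplas datos out) := by unfold Spec_generar_lista_tuplas; infer_instance

-- ===== CLAIM (what is proved, stated in full; the proofs are below) =====
def Claim_equal_generar_lista_tuplas : Prop := ∀ (datos : List (String × String)), Dom_generar_lista_tuplas datos → Spec_generar_lista_tuplas datos (generar_lista_tuplas datos)

-- ===== LEMMAS AND PROOFS =====

-- A's final sorted() is the identity on a list with strictly increasing first components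
lemma sorted2_fst_eq_self (L : List (String × List String))
    (h : L.Pairwise (fun a b => a.1 < b.1)) :
    PySem.List.sorted2 L Prod.fst Prod.snd = L := by
  have key : ∀ (M acc : List (String × List String)),
      M.Pairwise (fun a b => a.1 < b.1) →
      (∀ a ∈ acc, ∀ x ∈ M, a.1 < x.1) →
      (M.foldl (fun acc x =>
        PySem.List.insertBy
          (fun a b => decide (a.1 < b.1) || (!decide (b.1 < a.1) && decide (a.2 < b.2))) x acc) acc)
        = acc ++ M := by
    intro M
    induction M with
    | nil => intro acc _ _; simp
    | cons x M ih =>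
      intro acc hM hcross
      rcases List.pairwise_cons.mp hM with ⟨hx, hM'⟩
      have hins : PySem.List.insertBy
          (fun a b => decide (a.1 < b.1) || (!decide (b.1 < a.1) && decide (a.2 < b.2))) x acc
          = acc ++ [x] := by
        apply PySem.List.insertBy_of_forall_not_before
        intro y hy
        have h1 : y.1 < x.1 := hcross y hy x (List.mem_cons_self ..)
        show (decide (x.1 < y.1) || (!decide (y.1 < x.1) && decide (x.2 < y.2))) = false
        rw [decide_eq_false (asymm h1), decide_eq_true h1]
        rfl
      simp only [List.foldl_cons, hins]
      rw [ih (acc ++ [x]) hM']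
      · simp
      · intro a ha z hz
        rcases List.mem_append.mp ha with ha | ha
        · exact hcross a ha z (List.mem_cons_of_mem x hz)
        · simpa [List.mem_singleton.mp ha] using hx z hz
  rw [show PySem.List.sorted2 L Prod.fst Prod.snd =
      L.foldl (fun acc x =>
        PySem.List.insertBy
          (fun a b => decide (a.1 < b.1) || (!decide (b.1 < a.1) && decide (a.2 < b.2))) x acc) []
    from rfl]
  simpa using key L [] h (by simp)

lemma update_self {α : Type} [BEq α] [LawfulBEq α] :
    ∀ (xs s : List α), (∀ x ∈ xs, x ∈ s) → PySem.Set.update s xs = s := by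
  intro xs
  induction xs with
  | nil => intro s _; rfl
  | cons x xs ih =>
    intro s h
    have hx : x ∈ s := h x List.mem_cons_self
    have hadd : PySem.Set.add s x = s := by
      simp [PySem.Set.add, PySem.Set.contains, hx]
    show List.foldl PySem.Set.add s (x :: xs) = s
    rw [List.foldl_cons, hadd]
    exact ih s (fun y hy => h y (List.mem_cons_of_mem x hy))

-- ---- Dict loop 1: values and keys ----
lemma getD_loop (l : List (String × String)) :
    ∀ (d : PySem.Dict String (List String)) (v : String),
      (l.foldl (fun d fila => d.modify fila.2 PySem.Set.empty (fun s => PySem.Set.add s fila.1)) d).getD v []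
        = PySem.Set.update (d.getD v []) ((l.filter (fun p => p.2 == v)).map Prod.fst) := by
  induction l with
  | nil => intro d v; rfl
  | cons p l ih =>
    intro d v
    rw [List.foldl_cons, ih]
    by_cases hv : p.2 = v
    · subst hv
      simp [PySem.Dict.modify, PySem.Set.update]
    · have hbv : (p.2 == v) = false := beq_eq_false_iff_ne.mpr hv
      have hv' : v ≠ p.2 := fun h => hv h.symm
      simp [PySem.Dict.modify, PySem.Dict.getD_insert, hbv, hv']

lemma keys_loop (datos : List (String × String)) :
    (datos.foldl (fun d fila => d.modify fila.2 PySem.Set.empty (fun s => PySem.Set.add s fila.1))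
      (PySem.Dict.empty : PySem.Dict String (List String))).keys
      = PySem.Set.ofList (datos.map Prod.snd) := by
  have h := PySem.Dict.keys_foldl_modify_key datos Prod.snd PySem.Set.empty
    (fun _ fila => (fun s => PySem.Set.add s fila.1))
    (PySem.Dict.empty : PySem.Dict String (List String))
  rw [show (PySem.Dict.empty : PySem.Dict String (List String)).keys = [] from rfl] at h
  rw [PySem.Set.ofList_eq_foldl]
  exact h

-- ---- Dict loop 2: values and keys ----
lemma getD_loop2 (ks : List String) :
    ∀ (d : PySem.Dict String (List String)) (v : String), ks.Nodup →
      ((ks.foldl (fun d valor => d.insert valor (PySem.List.sorted (d.getD valor []) (fun x => x))) d).getD v [])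
        = if v ∈ ks then PySem.List.sorted (d.getD v []) (fun x => x) else d.getD v [] := by
  induction ks with
  | nil => intro d v _; simp
  | cons k ks ih =>
    intro d v hnd
    rcases List.nodup_cons.mp hnd with ⟨hk, hnd'⟩
    rw [List.foldl_cons, ih _ v hnd']
    by_cases hv : v = k
    · subst hv
      simp [hk]
    · simp [PySem.Dict.getD_insert, hv, List.mem_cons]

lemma keys_loop2 (d : PySem.Dict String (List String)) :
    ((d.keys).foldl (fun d valor => d.insert valor (PySem.List.sorted (d.getD valor []) (fun x => x))) d).keys
      = d.keys := by
  rw [PySem.Dict.keys_foldl_insert]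
  exact update_self _ _ (fun x hx => hx)

-- ---- A equals B's comprehension form ----
lemma portA_eq_alt (datos : List (String × String)) :
    generar_lista_tuplas datos = generar_lista_tuplas_alt datos := by
  have hmain : ∀ (d1 d2 : PySem.Dict String (List String)),
      d1 = datos.foldl (fun d fila => d.modify fila.2 PySem.Set.empty (fun s => PySem.Set.add s fila.1))
        (PySem.Dict.empty : PySem.Dict String (List String)) →
      d2 = d1.keys.foldl
        (fun d valor => d.insert valor (PySem.List.sorted (d.getD valor []) (fun x => x))) d1 →
      PySem.List.sorted2
        ((PySem.List.sorted d2.keys (fun v => v)).map (fun valor => (valor, d2.getD valor [])))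
        Prod.fst Prod.snd = generar_lista_tuplas_alt datos := by
    intro d1 d2 hd1 hd2
    have hk1 : d1.keys = PySem.Set.ofList (datos.map Prod.snd) := hd1 ▸ keys_loop datos
    have hk2 : d2.keys = d1.keys := hd2 ▸ keys_loop2 d1
    have hnd : d1.keys.Nodup := by rw [hk1]; exact PySem.Set.nodup_ofList _
    have hv1 : ∀ v : String, d1.getD v []
        = PySem.Set.ofList ((datos.filter (fun p => p.2 == v)).map Prod.fst) := by
      intro v
      rw [hd1, getD_loop]
      rw [show (PySem.Dict.empty : PySem.Dict String (List String)).getD v [] = [] from rfl]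
      rw [PySem.Set.ofList_eq_foldl]
      rfl
    have hv2 : ∀ v : String, v ∈ d1.keys → d2.getD v []
        = PySem.List.sorted (d1.getD v []) (fun x => x) := by
      intro v hv
      rw [hd2, getD_loop2 _ _ _ hnd, if_pos hv]
    have hL : (PySem.List.sorted d2.keys (fun v => v)).map (fun valor => (valor, d2.getD valor []))
        = generar_lista_tuplas_alt datos := by
      rw [hk2, hk1]
      unfold generar_lista_tuplas_alt
      apply List.map_congr_left
      intro v hv
      have hvk : v ∈ PySem.Set.ofList (datos.map Prod.snd) :=
        (PySem.List.mem_sorted _ _ _ v).mp hv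
      rw [hv2 v (hk1 ▸ hvk), hv1 v]
    rw [hL]
    apply sorted2_fst_eq_self
    unfold generar_lista_tuplas_alt
    rw [List.pairwise_map]
    exact (PySem.List.sorted_ofList_pairwise_lt (datos.map Prod.snd)).imp (fun h => h)
  exact hmain _ _ rfl rfl

-- ===== VERDICT (by name: the statement is the Claim_ definition above) =====
theorem generar_lista_tuplas_spec : Claim_equal_generar_lista_tuplas := by
  intro datos _
  unfold Spec_generar_lista_tuplas
  exact portA_eq_alt datos
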